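-- pv_equiv track=rewrite | github.com/BonfireAI/bonfire | src/bonfire/onboard/conversation.py | _analyze_q3
-- ===== SOURCE A (Python) =====
-- def _analyze_q3(text: str) -> tuple[str, dict[str, str]]:
--     """Analyze Q3 answer: speed/noise/control/understanding."""
--     lower = text.lower()
--     profile: dict[str, str] = {}
--
--     speed_kw = {
--         "slow",
--         "fast",
--         "speed",
--         "quick",
--         "wait",
--         "waiting",
--         "forever",
--         "laggy",
--         "performance",
--     }
--     noise_kw = {
--         "noise",
--         "noisy",
--         "loud",
--         "clutter",
--         "cluttered",
--         "notifications",
--         "distract",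
--         "distracting",
--         "overwhelming",
--     }
--     control_kw = {
--         "opinionated",
--         "control",
--         "rigid",
--         "flexible",
--         "freedom",
--         "own",
--         "myself",
--         "customiz",
--         "config",
--     }
--     understand_kw = {
--         "understand",
--         "listen",
--         "context",
--         "know",
--         "aware",
--         "misunderstand",
--         "ignore",
--         "ignoring",
--     }
--
--     words = lower.split()
--     score_speed = sum(1 for w in words if any(w.strip(".,!?;:'\"").startswith(k) for k in speed_kw))
--     score_noise = sum(1 for w in words if any(w.strip(".,!?;:'\"").startswith(k) for k in noise_kw))
--     score_control = sum(
--         1 for w in words if any(w.strip(".,!?;:'\"").startswith(k) for k in control_kw)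
--     )
--     score_understand = sum(
--         1 for w in words if any(w.strip(".,!?;:'\"").startswith(k) for k in understand_kw)
--     )
--
--     scores = {
--         "speed": score_speed,
--         "noise": score_noise,
--         "control": score_control,
--         "understanding": score_understand,
--     }
--     winner = max(scores, key=lambda k: scores[k])
--
--     if scores[winner] == 0:
--         # No signal — default to understanding
--         winner = "understanding"
--
--     reflections = {
--         "speed": ("Too slow. The fire burns faster than the tools can follow."),
--         "noise": ("Too loud. You want the signal without the noise."),
--         "control": ("Too opinionated. You'd rather hold the hammer yourself."),
--         "understanding": ("They don't listen. That's what we're fixing."),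
--     }
--
--     pain_map = {
--         "speed": "latency",
--         "noise": "information_overload",
--         "control": "rigidity",
--         "understanding": "poor_context",
--     }
--
--     profile["pain_point"] = pain_map[winner]
--
--     return reflections[winner], profile
-- ===== SOURCE B (Python) =====
-- def _analyze_q3(text: str) -> tuple[str, dict[str, str]]:
--     """Single fused pass: strip each word once, test all four keyword tuples,
--     then pick the winner with an explicit comparison chain (first max wins)."""
--     PUNCT = ".,!?;:'\""
--     SPEED = ("slow", "fast", "speed", "quick", "wait", "waiting", "forever", "laggy", "performance")
--     NOISE = ("noise", "noisy", "loud", "clutter", "cluttered", "notifications", "distract", "distracting", "overwhelming")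
--     CONTROL = ("opinionated", "control", "rigid", "flexible", "freedom", "own", "myself", "customiz", "config")
--     UNDERSTAND = ("understand", "listen", "context", "know", "aware", "misunderstand", "ignore", "ignoring")
--
--     speed = noise = control = understand = 0
--     for w in text.lower().split():
--         core = w.strip(PUNCT)
--         if core.startswith(SPEED):
--             speed += 1
--         if core.startswith(NOISE):
--             noise += 1
--         if core.startswith(CONTROL):
--             control += 1
--         if core.startswith(UNDERSTAND):
--             understand += 1
--
--     if speed == noise == control == understand == 0:
--         winner = "understanding"
--     elif speed >= noise and speed >= control and speed >= understand:
--         winner = "speed"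
--     elif noise >= control and noise >= understand:
--         winner = "noise"
--     elif control >= understand:
--         winner = "control"
--     else:
--         winner = "understanding"
--
--     reflections = {
--         "speed": "Too slow. The fire burns faster than the tools can follow.",
--         "noise": "Too loud. You want the signal without the noise.",
--         "control": "Too opinionated. You'd rather hold the hammer yourself.",
--         "understanding": "They don't listen. That's what we're fixing.",
--     }
--     pain_map = {
--         "speed": "latency",
--         "noise": "information_overload",
--         "control": "rigidity",
--         "understanding": "poor_context",
--     }
--     return reflections[winner], {"pain_point": pain_map[winner]}
-- ===== Notes on version B (the rewrite author's own statement) =====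
-- stated objective: simpler
-- what changed: B fuses A's four separate counting passes over the word list into one pass that strips each word once and tests all four keyword tuples via startswith(tuple), and replaces the scores-dict + max(key=...) winner selection by an explicit first-max comparison chain.
import Mathlib
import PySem

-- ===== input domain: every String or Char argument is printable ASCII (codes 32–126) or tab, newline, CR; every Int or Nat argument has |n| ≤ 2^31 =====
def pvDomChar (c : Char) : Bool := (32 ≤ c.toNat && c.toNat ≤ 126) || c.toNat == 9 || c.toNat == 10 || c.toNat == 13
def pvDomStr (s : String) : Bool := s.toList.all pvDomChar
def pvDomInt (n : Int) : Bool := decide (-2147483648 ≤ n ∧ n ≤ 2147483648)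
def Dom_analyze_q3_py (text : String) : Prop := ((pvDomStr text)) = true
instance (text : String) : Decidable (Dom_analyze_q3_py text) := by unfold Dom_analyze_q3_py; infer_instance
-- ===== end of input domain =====

-- B fuses A's four counting passes into one pass (strip each word once), and replaces
-- the dict + max(key=...) winner selection by an explicit comparison chain (objective: simpler).

-- shared keyword/text constants (iteration order of A's Python sets is irrelevant: only `any` over them is taken)
def pvPunct : String := ".,!?;:'\""
def pvKwSpeed : List String := ["slow","fast","speed","quick","wait","waiting","forever","laggy","performance"]
def pvKwNoise : List String := ["noise","noisy","loud","clutter","cluttered","notifications","distract","distracting","overwhelming"]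
def pvKwControl : List String := ["opinionated","control","rigid","flexible","freedom","own","myself","customiz","config"]
def pvKwUnderstand : List String := ["understand","listen","context","know","aware","misunderstand","ignore","ignoring"]
def pvReflSpeed : String := "Too slow. The fire burns faster than the tools can follow."
def pvReflNoise : String := "Too loud. You want the signal without the noise."
def pvReflControl : String := "Too opinionated. You'd rather hold the hammer yourself."
def pvReflUnderstand : String := "They don't listen. That's what we're fixing."

-- ===== PORT A =====
-- `sum(1 for w in words if any(...))` is the counting loop; `max(scores, key=...)` is
-- PySem.List.max? over the dict's keys (first maximal key, Python's rule); the final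
-- `reflections[winner]` / `pain_map[winner]` lookups are Dict.getD with an unreachable default
-- (winner is always one of the four keys).
def analyze_q3_py (text : String) : String × (List (String × String)) :=
  let lower := PySem.Str.lower text
  let words := PySem.Str.split₀ lower
  let score_speed : Int :=
    words.foldl (fun acc w => if pvKwSpeed.any (fun k => PySem.Str.startswith (PySem.Str.stripChars w pvPunct) k) then acc + 1 else acc) 0
  let score_noise : Int :=
    words.foldl (fun acc w => if pvKwNoise.any (fun k => PySem.Str.startswith (PySem.Str.stripChars w pvPunct) k) then acc + 1 else acc) 0
  let score_control : Int :=
    words.foldl (fun acc w => if pvKwControl.any (fun k => PySem.Str.startswith (PySem.Str.stripChars w pvPunct) k) then acc + 1 else acc) 0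
  let score_understand : Int :=
    words.foldl (fun acc w => if pvKwUnderstand.any (fun k => PySem.Str.startswith (PySem.Str.stripChars w pvPunct) k) then acc + 1 else acc) 0
  let scores : PySem.Dict String Int :=
    ((((PySem.Dict.empty.insert "speed" score_speed).insert "noise" score_noise).insert
        "control" score_control).insert "understanding" score_understand)
  let winner0 := (PySem.List.max? scores.keys (fun k => scores.getD k 0)).getD ""
  let winner := if scores.getD winner0 0 == 0 then "understanding" else winner0
  let reflections : PySem.Dict String String :=
    ((((PySem.Dict.empty.insert "speed" pvReflSpeed).insert "noise" pvReflNoise).insert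
        "control" pvReflControl).insert "understanding" pvReflUnderstand)
  let pain_map : PySem.Dict String String :=
    ((((PySem.Dict.empty.insert "speed" "latency").insert "noise" "information_overload").insert
        "control" "rigidity").insert "understanding" "poor_context")
  let profile : PySem.Dict String String := PySem.Dict.empty.insert "pain_point" (pain_map.getD winner "")
  (reflections.getD winner "", profile.items)

-- ===== PORT B =====
def pvStep (s : Int × Int × Int × Int) (w : String) : Int × Int × Int × Int :=
  let core := PySem.Str.stripChars w pvPunct
  let a := if pvKwSpeed.any (fun k => PySem.Str.startswith core k) then s.1 + 1 else s.1
  let b := if pvKwNoise.any (fun k => PySem.Str.startswith core k) then s.2.1 + 1 else s.2.1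
  let c := if pvKwControl.any (fun k => PySem.Str.startswith core k) then s.2.2.1 + 1 else s.2.2.1
  let d := if pvKwUnderstand.any (fun k => PySem.Str.startswith core k) then s.2.2.2 + 1 else s.2.2.2
  (a, b, c, d)

def analyze_q3_py_alt (text : String) : String × (List (String × String)) :=
  let s := (PySem.Str.split₀ (PySem.Str.lower text)).foldl pvStep (0, 0, 0, 0)
  let speed := s.1; let noise := s.2.1; let control := s.2.2.1; let understand := s.2.2.2
  let winner :=
    if speed == 0 && noise == 0 && control == 0 && understand == 0 then "understanding"
    else if speed ≥ noise && speed ≥ control && speed ≥ understand then "speed"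
    else if noise ≥ control && noise ≥ understand then "noise"
    else if control ≥ understand then "control"
    else "understanding"
  let refl := if winner == "speed" then pvReflSpeed
    else if winner == "noise" then pvReflNoise
    else if winner == "control" then pvReflControl
    else pvReflUnderstand
  let pain := if winner == "speed" then "latency"
    else if winner == "noise" then "information_overload"
    else if winner == "control" then "rigidity"
    else "poor_context"
  (refl, [("pain_point", pain)])

-- ===== PRECONDITION & SPEC =====
def Spec_analyze_q3_py (text : String) (out : String × (List (String × String))) : Prop := out = analyze_q3_py_alt text
instance (text : String) (out : String × (List (String × String))) : Decidable (Spec_analyze_q3_py text out) := by unfold Spec_analyze_q3_py; infer_instance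

-- ===== CLAIM (what is proved, stated in full; the proofs are below) =====
def Claim_equal_analyze_q3_py : Prop := ∀ (text : String), Dom_analyze_q3_py text → Spec_analyze_q3_py text (analyze_q3_py text)

-- ===== LEMMAS AND PROOFS =====

-- B's fused pass splits into A's four independent counting folds.
theorem pvFold_split (ws : List String) (a b c d : Int) :
    ws.foldl pvStep (a, b, c, d) =
      (ws.foldl (fun acc w => if pvKwSpeed.any (fun k => PySem.Str.startswith (PySem.Str.stripChars w pvPunct) k) then acc + 1 else acc) a,
       ws.foldl (fun acc w => if pvKwNoise.any (fun k => PySem.Str.startswith (PySem.Str.stripChars w pvPunct) k) then acc + 1 else acc) b,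
       ws.foldl (fun acc w => if pvKwControl.any (fun k => PySem.Str.startswith (PySem.Str.stripChars w pvPunct) k) then acc + 1 else acc) c,
       ws.foldl (fun acc w => if pvKwUnderstand.any (fun k => PySem.Str.startswith (PySem.Str.stripChars w pvPunct) k) then acc + 1 else acc) d) := by
  induction ws generalizing a b c d with
  | nil => rfl
  | cons w t ih => simp only [List.foldl_cons, pvStep]; exact ih _ _ _ _

-- counting folds starting at 0 stay nonnegative
theorem pvFoldCount_le (ws : List String) (p : String → Bool) (a : Int) :
    a ≤ ws.foldl (fun acc w => if p w then acc + 1 else acc) a := by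
  induction ws generalizing a with
  | nil => simp
  | cons w t ih =>
    simp only [List.foldl_cons]
    refine le_trans ?_ (ih _)
    split <;> omega

theorem pvFoldCount_nonneg (ws : List String) (p : String → Bool) :
    0 ≤ ws.foldl (fun acc w => if p w then acc + 1 else acc) (0 : Int) :=
  pvFoldCount_le ws p 0

-- A's dict+max winner selection agrees with B's comparison chain, for any four scores.
theorem pvWinner_eq (s n c u : Int) (hs : 0 ≤ s) (hn : 0 ≤ n) (hc : 0 ≤ c) (hu : 0 ≤ u) :
    (if (((((PySem.Dict.empty.insert "speed" s).insert "noise" n).insert "control" c).insert "understanding" u).getD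
          ((PySem.List.max?
              (((((PySem.Dict.empty.insert "speed" s).insert "noise" n).insert "control" c).insert "understanding" u).keys)
              (fun k => ((((PySem.Dict.empty.insert "speed" s).insert "noise" n).insert "control" c).insert "understanding" u).getD k 0)).getD "")
          0) == 0 then "understanding"
     else
       (PySem.List.max?
           (((((PySem.Dict.empty.insert "speed" s).insert "noise" n).insert "control" c).insert "understanding" u).keys)
           (fun k => ((((PySem.Dict.empty.insert "speed" s).insert "noise" n).insert "control" c).insert "understanding" u).getD k 0)).getD "")
    =
    (if s == 0 && n == 0 && c == 0 && u == 0 then "understanding"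
     else if s ≥ n && s ≥ c && s ≥ u then "speed"
     else if n ≥ c && n ≥ u then "noise"
     else if c ≥ u then "control"
     else "understanding") := by
  simp [PySem.List.max?, PySem.Dict.getD, PySem.Dict.get?, PySem.Dict.insert,
    PySem.Dict.empty, PySem.Dict.keys]
  by_cases h1 : s < n <;> simp only [h1, if_true, if_false] <;> (try simp) <;>
    first
      | (by_cases h2 : n < c <;> simp only [h2, if_true, if_false] <;> (try simp) <;>
          first
            | (by_cases h3 : c < u <;> simp only [h3, if_true, if_false] <;> (try simp) <;>
                split_ifs <;> simp_all <;> omega)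
            | (by_cases h3 : n < u <;> simp only [h3, if_true, if_false] <;> (try simp) <;>
                split_ifs <;> simp_all <;> omega))
      | (by_cases h2 : s < c <;> simp only [h2, if_true, if_false] <;> (try simp) <;>
          first
            | (by_cases h3 : c < u <;> simp only [h3, if_true, if_false] <;> (try simp) <;>
                split_ifs <;> simp_all <;> omega)
            | (by_cases h3 : s < u <;> simp only [h3, if_true, if_false] <;> (try simp) <;>
                split_ifs <;> simp_all <;> omega))

set_option maxHeartbeats 1000000 in
theorem pvSelect_eq (s n c u : Int) (hs : 0 ≤ s) (hn : 0 ≤ n) (hc : 0 ≤ c) (hu : 0 ≤ u) :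
    (let scores : PySem.Dict String Int :=
       ((((PySem.Dict.empty.insert "speed" s).insert "noise" n).insert "control" c).insert "understanding" u)
     let winner0 := (PySem.List.max? scores.keys (fun k => scores.getD k 0)).getD ""
     let winner := if scores.getD winner0 0 == 0 then "understanding" else winner0
     let reflections : PySem.Dict String String :=
       ((((PySem.Dict.empty.insert "speed" pvReflSpeed).insert "noise" pvReflNoise).insert
           "control" pvReflControl).insert "understanding" pvReflUnderstand)
     let pain_map : PySem.Dict String String :=
       ((((PySem.Dict.empty.insert "speed" "latency").insert "noise" "information_overload").insert
           "control" "rigidity").insert "understanding" "poor_context")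
     ((reflections.getD winner "", (PySem.Dict.empty.insert "pain_point" (pain_map.getD winner "")).items) :
        String × List (String × String)))
    =
    (let winner :=
       if s == 0 && n == 0 && c == 0 && u == 0 then "understanding"
       else if s ≥ n && s ≥ c && s ≥ u then "speed"
       else if n ≥ c && n ≥ u then "noise"
       else if c ≥ u then "control"
       else "understanding"
     let refl := if winner == "speed" then pvReflSpeed
       else if winner == "noise" then pvReflNoise
       else if winner == "control" then pvReflControl
       else pvReflUnderstand
     let pain := if winner == "speed" then "latency"
       else if winner == "noise" then "information_overload"
       else if winner == "control" then "rigidity"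
       else "poor_context"
     (refl, [("pain_point", pain)])) := by
  show (((((PySem.Dict.empty.insert "speed" pvReflSpeed).insert "noise" pvReflNoise).insert
           "control" pvReflControl).insert "understanding" pvReflUnderstand).getD _ "",
        (PySem.Dict.empty.insert "pain_point"
          (((((PySem.Dict.empty.insert "speed" "latency").insert "noise" "information_overload").insert
           "control" "rigidity").insert "understanding" "poor_context").getD _ "")).items) = _
  rw [pvWinner_eq s n c u hs hn hc hu]
  split_ifs <;> rfl

-- ===== VERDICT (by name: the statement is the Claim_ definition above) =====
set_option maxHeartbeats 1000000 in
theorem analyze_q3_py_spec : Claim_equal_analyze_q3_py := by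
  intro text _
  show analyze_q3_py text = analyze_q3_py_alt text
  unfold analyze_q3_py analyze_q3_py_alt
  rw [pvFold_split]
  exact pvSelect_eq _ _ _ _ (pvFoldCount_nonneg _ _) (pvFoldCount_nonneg _ _)
    (pvFoldCount_nonneg _ _) (pvFoldCount_nonneg _ _)
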